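-- pv_equiv track=rewrite | github.com/emgocmen/netscan-pro | main.py | format_port_range
-- ===== SOURCE A (Python) =====
-- def format_port_range(port_list):
--     """
--     Port listesini sıkıştırılmış metin gösterimine dönüştürür
--     Örn: [80, 81, 82, 83, 443, 8000, 8001, 8002] -> "80-83,443,8000-8002"
--     """
--     if not port_list:
--         return ""
--
--     # Portları sırala
--     ports = sorted(port_list)
--
--     # Sürekli aralıkları bul
--     ranges = []
--     range_start = ports[0]
--     prev_port = ports[0]
--
--     for port in ports[1:]:
--         if port > prev_port + 1:
--             # Aralık sonu
--             if prev_port == range_start: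
--                 ranges.append(str(range_start))
--             else:
--                 ranges.append(f"{range_start}-{prev_port}")
--             range_start = port
--         prev_port = port
--
--     # Son aralığı işle
--     if prev_port == range_start:
--         ranges.append(str(range_start))
--     else:
--         ranges.append(f"{range_start}-{prev_port}")
--
--     return ",".join(ranges)
-- ===== SOURCE B (Python) =====
-- def format_port_range(port_list):
--     """Compress a port list into range notation, e.g. [80,81,82,443] -> "80-82,443".
--
--     Boundary-detection algorithm: a port p starts a run iff p-1 is not in the
--     set, and ends a run iff p+1 is not in the set; the sorted start and end
--     boundaries pair up positionally.
--     """
--     s = set(port_list)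
--     starts = sorted(p for p in s if p - 1 not in s)
--     ends = sorted(p for p in s if p + 1 not in s)
--     return ",".join(str(a) if a == b else f"{a}-{b}" for a, b in zip(starts, ends))
-- ===== Notes on version B (the rewrite author's own statement) =====
-- stated objective: alternative
-- what changed: B detects run boundaries by set membership (p is a run start iff p-1 is not in the set, an end iff p+1 is not), sorts the two boundary lists independently and zips them, instead of A's sequential merge pass with range_start/prev_port state over the sorted list.
import Mathlib
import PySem

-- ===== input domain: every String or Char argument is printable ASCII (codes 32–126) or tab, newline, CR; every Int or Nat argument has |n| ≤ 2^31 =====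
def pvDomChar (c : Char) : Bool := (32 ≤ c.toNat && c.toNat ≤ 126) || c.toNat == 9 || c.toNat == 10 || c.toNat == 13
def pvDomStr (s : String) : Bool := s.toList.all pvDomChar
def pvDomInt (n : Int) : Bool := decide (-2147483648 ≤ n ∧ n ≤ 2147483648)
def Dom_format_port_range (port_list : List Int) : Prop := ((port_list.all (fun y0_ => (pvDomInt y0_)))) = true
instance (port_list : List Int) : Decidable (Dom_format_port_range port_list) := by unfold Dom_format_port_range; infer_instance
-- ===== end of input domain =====

-- B replaces A's sequential merge pass (range_start/prev_port state machine) by boundary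
-- detection via set membership: run starts are ports p with p-1 not in the set, run ends
-- ports with p+1 not in the set; the two sorted boundary lists are zipped (alternative).

-- ===== PORT A =====
-- one loop step of A: state = (ranges, range_start, prev_port)
def pvStepA (st : List String × Int × Int) (port : Int) : List String × Int × Int :=
  let (ranges, range_start, prev_port) := st
  if port > prev_port + 1 then
    (ranges ++ [if prev_port = range_start then PySem.Int.toStr range_start
                else PySem.Int.toStr range_start ++ "-" ++ PySem.Int.toStr prev_port],
     port, port)
  else (ranges, range_start, port)

def format_port_range (port_list : List Int) : String :=
  if port_list = [] then ""
  else
    match PySem.List.sorted port_list (fun x => x) false with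
    | [] => ""   -- unreachable: sorted of a nonempty list is nonempty (guard above)
    | p0 :: rest =>   -- ports[0] = p0, ports[1:] = rest
      let st := rest.foldl pvStepA ([], p0, p0)
      let (ranges, range_start, prev_port) := st
      let ranges := ranges ++ [if prev_port = range_start then PySem.Int.toStr range_start
                               else PySem.Int.toStr range_start ++ "-" ++ PySem.Int.toStr prev_port]
      PySem.Str.join "," ranges

-- ===== PORT B =====
def format_port_range_alt (port_list : List Int) : String :=
  let s := PySem.Set.ofList port_list
  let starts := PySem.List.sorted (s.filter (fun p => !(s.contains (p - 1)))) (fun x => x) false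
  let ends := PySem.List.sorted (s.filter (fun p => !(s.contains (p + 1)))) (fun x => x) false
  PySem.Str.join "," ((starts.zip ends).map
    (fun ab => if ab.1 = ab.2 then PySem.Int.toStr ab.1
               else PySem.Int.toStr ab.1 ++ "-" ++ PySem.Int.toStr ab.2))

-- ===== PRECONDITION & SPEC =====
def Spec_format_port_range (port_list : List Int) (out : String) : Prop := out = format_port_range_alt port_list
instance (port_list : List Int) (out : String) : Decidable (Spec_format_port_range port_list out) := by unfold Spec_format_port_range; infer_instance

-- ===== CLAIM (what is proved, stated in full; the proofs are below) =====
def Claim_equal_format_port_range : Prop := ∀ (port_list : List Int), Dom_format_port_range port_list → Spec_format_port_range port_list (format_port_range port_list)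

-- ===== LEMMAS AND PROOFS =====

def pvFmt (r : Int × Int) : String :=
  if r.1 = r.2 then PySem.Int.toStr r.1 else PySem.Int.toStr r.1 ++ "-" ++ PySem.Int.toStr r.2

-- reference run builder (proof tool only): extend the last run or open a new one
def pvStepB (runs : List (Int × Int)) (p : Int) : List (Int × Int) :=
  match runs.getLast? with
  | some (a, b) => if p = b + 1 then runs.dropLast ++ [(a, p)] else runs ++ [(p, p)]
  | none => runs ++ [(p, p)]

-- run starts strictly after an element prev
def pvStarts (prev : Int) : List Int → List Int
  | [] => []
  | x :: xs => if x = prev + 1 then pvStarts x xs else x :: pvStarts x xs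

-- run ends from an element prev on
def pvEnds (prev : Int) : List Int → List Int
  | [] => [prev]
  | x :: xs => if x = prev + 1 then pvEnds x xs else prev :: pvEnds x xs

-- consecutive dedup of a sorted list, relative to the previous element
def pvDdt (prev : Int) : List Int → List Int
  | [] => []
  | x :: xs => if x = prev then pvDdt prev xs else x :: pvDdt x xs

theorem pvDdt_sublist (prev : Int) (s : List Int) : (pvDdt prev s).Sublist s := by
  induction s generalizing prev with
  | nil => simp [pvDdt]
  | cons x xs ih =>
    simp only [pvDdt]
    split
    · exact (ih prev).cons x
    · exact (ih x).cons₂ x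

theorem pvDdt_mem (prev : Int) (s : List Int) (y : Int) (hy : y ∈ s) :
    y ∈ prev :: pvDdt prev s := by
  induction s generalizing prev with
  | nil => cases hy
  | cons x xs ih =>
    simp only [pvDdt]
    rcases List.mem_cons.mp hy with h | h
    · subst h
      split
      · next hx => subst hx; exact List.mem_cons_self
      · exact List.mem_cons_of_mem _ List.mem_cons_self
    · split
      · exact ih prev h
      · rcases List.mem_cons.mp (ih x h) with h' | h'
        · exact List.mem_cons_of_mem _ (h' ▸ List.mem_cons_self)
        · exact List.mem_cons_of_mem _ (List.mem_cons_of_mem _ h')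

theorem pvDdt_pairwise_lt (prev : Int) (s : List Int)
    (h : (prev :: s).Pairwise (· ≤ ·)) : (prev :: pvDdt prev s).Pairwise (· < ·) := by
  induction s generalizing prev with
  | nil => simp [pvDdt]
  | cons x xs ih =>
    simp only [pvDdt]
    have hx : prev ≤ x := (List.pairwise_cons.mp h).1 x List.mem_cons_self
    have htail : (x :: xs).Pairwise (· ≤ ·) := (List.pairwise_cons.mp h).2
    split
    · next he =>
      subst he
      exact ih x htail
    · next hne =>
      have hlt : prev < x := lt_of_le_of_ne hx (fun e => hne e.symm)
      have hxs : (x :: pvDdt x xs).Pairwise (· < ·) := ih x htail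
      refine List.pairwise_cons.mpr ⟨?_, hxs⟩
      intro y hy
      rcases List.mem_cons.mp hy with h' | h'
      · exact h' ▸ hlt
      · have : x < y := (List.pairwise_cons.mp hxs).1 y h'
        exact lt_trans hlt this

-- sorted(set(l)) is the consecutive dedup of sorted(l)
theorem pvSortedSet_eq (l : List Int) (p0 : Int) (s' : List Int)
    (h : PySem.List.sorted l (fun x => x) false = p0 :: s') :
    PySem.List.sorted (PySem.Set.ofList l) (fun x => x) false = p0 :: pvDdt p0 s' := by
  have hpw : (p0 :: s').Pairwise (· ≤ ·) := by
    have := PySem.List.sorted_pairwise (xs := l) (key := fun x : Int => x)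
    rw [h] at this; exact this
  have hlt : (p0 :: pvDdt p0 s').Pairwise (· < ·) := pvDdt_pairwise_lt p0 s' hpw
  refine PySem.List.sorted_eq_of_perm_of_pairwise_lt _ _ _ ?_ hlt
  have hnd1 : (p0 :: pvDdt p0 s').Nodup := hlt.imp (fun {a b} hab => ne_of_lt hab)
  have hnd2 : (PySem.Set.ofList l).Nodup := PySem.Set.nodup_ofList l
  refine (List.perm_ext_iff_of_nodup hnd1 hnd2).mpr ?_
  intro y
  constructor
  · intro hy
    have hmem : y ∈ p0 :: s' := by
      rcases List.mem_cons.mp hy with h' | h'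
      · exact h' ▸ List.mem_cons_self
      · exact List.mem_cons_of_mem _ ((pvDdt_sublist p0 s').mem h')
    have : y ∈ PySem.List.sorted l (fun x => x) false := h ▸ hmem
    rw [PySem.List.mem_sorted] at this
    exact (PySem.Set.mem_ofList _ _).mpr this
  · intro hy
    have hyl : y ∈ l := (PySem.Set.mem_ofList _ _).mp hy
    have : y ∈ PySem.List.sorted l (fun x => x) false := (PySem.List.mem_sorted _ _ _ _).mpr hyl
    rw [h] at this
    rcases List.mem_cons.mp this with h' | h'
    · exact h' ▸ List.mem_cons_self
    · exact pvDdt_mem p0 s' y h'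

-- A's loop skips consecutive duplicates of the sorted list
theorem pvFoldA_ddt (s : List Int) (r : List String) (rs prev : Int)
    (h : (prev :: s).Pairwise (· ≤ ·)) :
    s.foldl pvStepA (r, rs, prev) = (pvDdt prev s).foldl pvStepA (r, rs, prev) := by
  induction s generalizing r rs prev with
  | nil => rfl
  | cons x xs ih =>
    have hx : prev ≤ x := (List.pairwise_cons.mp h).1 x List.mem_cons_self
    have htail : (x :: xs).Pairwise (· ≤ ·) := (List.pairwise_cons.mp h).2
    simp only [pvDdt, List.foldl_cons]
    split
    · next he =>
      subst he
      have hstep : pvStepA (r, rs, x) x = (r, rs, x) := by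
        simp [pvStepA]
      rw [hstep]
      exact ih r rs x htail
    · simp only [List.foldl_cons]
      obtain ⟨r', rs', hst⟩ : ∃ r' rs', pvStepA (r, rs, prev) x = (r', rs', x) := by
        simp only [pvStepA]; split <;> exact ⟨_, _, rfl⟩
      rw [hst]
      exact ih r' rs' x htail

-- A's loop and the reference run builder stay in lockstep on a strictly increasing tail
theorem pvInv (u : List Int) (R : List (Int × Int)) (rs prev : Int)
    (h : (prev :: u).Pairwise (· < ·)) :
    ∃ R' rs' p',
      u.foldl pvStepA (R.map pvFmt, rs, prev) = (R'.map pvFmt, rs', p') ∧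
      u.foldl pvStepB (R ++ [(rs, prev)]) = R' ++ [(rs', p')] := by
  induction u generalizing R rs prev with
  | nil => exact ⟨R, rs, prev, rfl, rfl⟩
  | cons x xs ih =>
    have hx : prev < x := (List.pairwise_cons.mp h).1 x List.mem_cons_self
    have htail : (x :: xs).Pairwise (· < ·) := (List.pairwise_cons.mp h).2
    simp only [List.foldl_cons]
    by_cases hgap : x > prev + 1
    · have hA : pvStepA (R.map pvFmt, rs, prev) x
          = ((R ++ [(rs, prev)]).map pvFmt, x, x) := by
        simp only [pvStepA, if_pos hgap, List.map_append, List.map_cons, List.map_nil]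
        congr 2
        simp only [pvFmt]
        by_cases he : prev = rs
        · subst he; simp
        · rw [if_neg he, if_neg (fun e => he e.symm)]
      have hB : pvStepB (R ++ [(rs, prev)]) x
          = (R ++ [(rs, prev)]) ++ [(x, x)] := by
        simp only [pvStepB, List.getLast?_concat]
        rw [if_neg (by omega)]
      rw [hA, hB]
      exact ih (R ++ [(rs, prev)]) x x htail
    · have hxe : x = prev + 1 := by omega
      have hA : pvStepA (R.map pvFmt, rs, prev) x = (R.map pvFmt, rs, x) := by
        simp only [pvStepA]; rw [if_neg hgap]
      have hB : pvStepB (R ++ [(rs, prev)]) x = R ++ [(rs, x)] := by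
        simp only [pvStepB, List.getLast?_concat]
        rw [if_pos hxe, List.dropLast_concat]
      rw [hA, hB]
      exact ih R rs x htail

-- the run builder's firsts are the starts, its seconds the ends
theorem pvRuns_fst_snd (u : List Int) (R : List (Int × Int)) (a prev : Int)
    (h : (prev :: u).Pairwise (· < ·)) :
    ((u.foldl pvStepB (R ++ [(a, prev)])).map Prod.fst
        = R.map Prod.fst ++ a :: pvStarts prev u) ∧
    ((u.foldl pvStepB (R ++ [(a, prev)])).map Prod.snd
        = R.map Prod.snd ++ pvEnds prev u) := by
  induction u generalizing R a prev with
  | nil => simp [pvStarts, pvEnds]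
  | cons x xs ih =>
    have hx : prev < x := (List.pairwise_cons.mp h).1 x List.mem_cons_self
    have htail : (x :: xs).Pairwise (· < ·) := (List.pairwise_cons.mp h).2
    simp only [List.foldl_cons, pvStarts, pvEnds]
    by_cases hxe : x = prev + 1
    · have hB : pvStepB (R ++ [(a, prev)]) x = R ++ [(a, x)] := by
        simp only [pvStepB, List.getLast?_concat]
        rw [if_pos hxe, List.dropLast_concat]
      rw [hB, if_pos hxe, if_pos hxe]
      exact ih R a x htail
    · have hB : pvStepB (R ++ [(a, prev)]) x = (R ++ [(a, prev)]) ++ [(x, x)] := by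
        simp only [pvStepB, List.getLast?_concat]
        rw [if_neg hxe]
      rw [hB, if_neg hxe, if_neg hxe]
      obtain ⟨h1, h2⟩ := ih (R ++ [(a, prev)]) x x htail
      constructor
      · rw [h1]; simp
      · rw [h2]; simp

-- the start filter of a strictly increasing list is pvStarts
theorem pvFilter_starts (u : List Int) (prev : Int)
    (h : (prev :: u).Pairwise (· < ·)) :
    u.filter (fun p => !((prev :: u).contains (p - 1))) = pvStarts prev u := by
  induction u generalizing prev with
  | nil => rfl
  | cons x xs ih =>
    have hx : prev < x := (List.pairwise_cons.mp h).1 x List.mem_cons_self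
    have htail : (x :: xs).Pairwise (· < ·) := (List.pairwise_cons.mp h).2
    have hxs : ∀ y ∈ xs, x < y := (List.pairwise_cons.mp htail).1
    have hkeep : ∀ p ∈ xs,
        ((prev :: x :: xs).contains (p - 1)) = ((x :: xs).contains (p - 1)) := by
      intro p hp
      have hpx : x < p := hxs p hp
      simp only [List.contains_cons]
      have : (p - 1 == prev) = false := by
        simp only [beq_eq_false_iff_ne]; omega
      rw [this]; simp
    have hxmem : ((prev :: x :: xs).contains (x - 1)) = decide (x = prev + 1) := by
      simp only [List.contains_cons]
      have h1 : (x - 1 == prev) = decide (x = prev + 1) := by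
        by_cases he : x = prev + 1
        · simp [he]
        · simp only [beq_eq_false_iff_ne.mpr (show x - 1 ≠ prev by omega)]
          simp [he]
      have h2 : (x - 1 == x) = false := by simp only [beq_eq_false_iff_ne]; omega
      have h3 : xs.contains (x - 1) = false := by
        simp only [List.contains_eq_mem, decide_eq_false_iff_not]
        intro hm; have := hxs _ hm; omega
      rw [h1, h2, h3]
      by_cases he : x = prev + 1 <;> simp [he]
    simp only [List.filter_cons, pvStarts]
    rw [List.filter_congr (fun p hp => by rw [hkeep p hp]), ih x htail, hxmem]
    by_cases he : x = prev + 1 <;> simp [he]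

-- the end filter of a strictly increasing list is pvEnds
theorem pvFilter_ends (u : List Int) (prev : Int)
    (h : (prev :: u).Pairwise (· < ·)) :
    (prev :: u).filter (fun p => !((prev :: u).contains (p + 1))) = pvEnds prev u := by
  induction u generalizing prev with
  | nil =>
    simp only [List.filter_cons, List.filter_nil, pvEnds, List.contains_cons,
      List.contains_nil]
    have : (prev + 1 == prev) = false := by simp only [beq_eq_false_iff_ne]; omega
    simp [this]
  | cons x xs ih =>
    have hx : prev < x := (List.pairwise_cons.mp h).1 x List.mem_cons_self
    have htail : (x :: xs).Pairwise (· < ·) := (List.pairwise_cons.mp h).2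
    have hxs : ∀ y ∈ xs, x < y := (List.pairwise_cons.mp htail).1
    have hkeep : ∀ p ∈ x :: xs,
        ((prev :: x :: xs).contains (p + 1)) = ((x :: xs).contains (p + 1)) := by
      intro p hp
      have hpge : x ≤ p := by
        rcases List.mem_cons.mp hp with h' | h'
        · omega
        · have := hxs p h'; omega
      simp only [List.contains_cons]
      have : (p + 1 == prev) = false := by simp only [beq_eq_false_iff_ne]; omega
      rw [this]; simp
    have hprev : ((prev :: x :: xs).contains (prev + 1)) = decide (x = prev + 1) := by
      simp only [List.contains_cons]
      have h1 : (prev + 1 == prev) = false := by simp only [beq_eq_false_iff_ne]; omega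
      have h2 : (prev + 1 == x) = decide (x = prev + 1) := by
        by_cases he : x = prev + 1 <;> simp [he]
        omega
      have h3 : xs.contains (prev + 1) = false := by
        simp only [List.contains_eq_mem, decide_eq_false_iff_not]
        intro hm; have := hxs _ hm
        by_cases he : x = prev + 1
        · omega
        · omega
      rw [h1, h2, h3]
      by_cases he : x = prev + 1 <;> simp [he]
    have hrest : ((x :: xs).filter fun p => !((prev :: x :: xs).contains (p + 1)))
        = pvEnds x xs := by
      rw [List.filter_congr (fun p hp => by rw [hkeep p hp])]
      exact ih x htail
    rw [List.filter_cons, hrest, hprev]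
    simp only [pvEnds]
    by_cases he : x = prev + 1 <;> simp [he]

-- ===== VERDICT (by name: the statement is the Claim_ definition above) =====
theorem format_port_range_spec : Claim_equal_format_port_range := by
  intro l _
  unfold Spec_format_port_range
  by_cases hnil : l = []
  · subst hnil; rfl
  · have hne : PySem.List.sorted l (fun x => x) false ≠ [] := by
      rw [Ne, PySem.List.sorted_eq_nil_iff]; exact hnil
    rcases hs : PySem.List.sorted l (fun x => x) false with _ | ⟨p0, s'⟩
    · exact absurd hs hne
    have hpw : (p0 :: s').Pairwise (· ≤ ·) := by
      have := PySem.List.sorted_pairwise (xs := l) (key := fun x : Int => x)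
      rw [hs] at this; exact this
    have hset := pvSortedSet_eq l p0 s' hs
    have hlt : (p0 :: pvDdt p0 s').Pairwise (· < ·) := pvDdt_pairwise_lt p0 s' hpw
    -- membership in the set = membership in its sorted version
    have hcont : ∀ y : Int,
        (PySem.Set.ofList l).contains y = (p0 :: pvDdt p0 s').contains y := by
      intro y
      have hiff : y ∈ (p0 :: pvDdt p0 s') ↔ y ∈ PySem.Set.ofList l := by
        rw [← hset]; exact PySem.List.mem_sorted _ _ _ _
      simp [List.contains_eq_mem, hiff]
    have hperm : (p0 :: pvDdt p0 s').Perm (PySem.Set.ofList l) := by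
      rw [← hset]; exact PySem.List.sorted_perm _ _ _
    -- the two boundary filters over the sorted set
    have hstartsL : (p0 :: pvDdt p0 s').filter
        (fun p => !((p0 :: pvDdt p0 s').contains (p - 1)))
        = p0 :: pvStarts p0 (pvDdt p0 s') := by
      have hp0 : ((p0 :: pvDdt p0 s').contains (p0 - 1)) = false := by
        simp only [List.contains_eq_mem, decide_eq_false_iff_not]
        intro hm
        rcases List.mem_cons.mp hm with h' | h'
        · omega
        · have : p0 < p0 - 1 := (List.pairwise_cons.mp hlt).1 _ h'; omega
      simp only [List.filter_cons, hp0, Bool.not_false, if_pos]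
      rw [pvFilter_starts _ _ hlt]
    have hendsL := pvFilter_ends (pvDdt p0 s') p0 hlt
    have hstarts : PySem.List.sorted
        ((PySem.Set.ofList l).filter (fun p => !((PySem.Set.ofList l).contains (p - 1))))
        (fun x => x) false = p0 :: pvStarts p0 (pvDdt p0 s') := by
      have hq : ((PySem.Set.ofList l).filter
            (fun p => !((PySem.Set.ofList l).contains (p - 1))))
          = ((PySem.Set.ofList l).filter
            (fun p => !((p0 :: pvDdt p0 s').contains (p - 1)))) :=
        List.filter_congr (fun p _ => by rw [hcont])
      rw [hq]
      refine PySem.List.sorted_eq_of_perm_of_pairwise_lt _ _ _ ?_ ?_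
      · rw [← hstartsL]; exact hperm.filter _
      · rw [← hstartsL]; exact hlt.filter _
    have hends : PySem.List.sorted
        ((PySem.Set.ofList l).filter (fun p => !((PySem.Set.ofList l).contains (p + 1))))
        (fun x => x) false = pvEnds p0 (pvDdt p0 s') := by
      have hq : ((PySem.Set.ofList l).filter
            (fun p => !((PySem.Set.ofList l).contains (p + 1))))
          = ((PySem.Set.ofList l).filter
            (fun p => !((p0 :: pvDdt p0 s').contains (p + 1)))) :=
        List.filter_congr (fun p _ => by rw [hcont])
      rw [hq]
      refine PySem.List.sorted_eq_of_perm_of_pairwise_lt _ _ _ ?_ ?_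
      · rw [← hendsL]; exact hperm.filter _
      · rw [← hendsL]; exact hlt.filter _
    -- A's fold produces exactly the runs, whose firsts/seconds are the boundary lists
    obtain ⟨R', rs', p', hA, hB⟩ := pvInv (pvDdt p0 s') [] p0 p0 hlt
    obtain ⟨hfst, hsnd⟩ := pvRuns_fst_snd (pvDdt p0 s') [] p0 p0 hlt
    rw [show (([] : List (Int × Int)) ++ [(p0, p0)]) = [(p0, p0)] from rfl] at hB hfst hsnd
    rw [hB] at hfst hsnd
    simp only [List.map_nil, List.nil_append] at hfst hsnd
    -- assemble
    show format_port_range l = format_port_range_alt l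
    simp only [format_port_range, format_port_range_alt, if_neg hnil, hs]
    rw [hstarts, hends, ← hfst, ← hsnd, List.zip_map', List.map_map]
    rw [pvFoldA_ddt s' [] p0 p0 hpw]
    rw [show ([] : List String) = ([] : List (Int × Int)).map pvFmt from rfl, hA]
    rw [show ((fun ab : Int × Int => if ab.1 = ab.2 then PySem.Int.toStr ab.1
          else PySem.Int.toStr ab.1 ++ "-" ++ PySem.Int.toStr ab.2) ∘ fun a => a)
        = pvFmt from rfl]
    simp only [List.map_append, List.map_cons, List.map_nil]
    congr 2
    simp only [pvFmt]
    by_cases he : p' = rs'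
    · subst he; simp
    · rw [if_neg he, if_neg (fun e => he e.symm)]
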